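-- pv_equiv track=rewrite | github.com/KimJinung/problem_solving | Programmers/Lv. 1/모의고사.py | solution
-- ===== SOURCE A (Python) =====
-- def solution(answers):
--     score_list = []
--
--     length = len(answers)
--
--     first_student = [1, 2, 3, 4, 5]
--     second_student = [2, 1, 2, 3, 2, 4, 2, 5]
--     third_student = [3, 3, 1, 1, 2, 2, 4, 4, 5, 5]
--
--     for student in [first_student, second_student, third_student]:
--         result = mark(answers, student)
--
--         score_list.append(result)
--
--     highest_score = max(score_list)
--
--     return [idx + 1 for idx in range(3) if score_list[idx] == highest_score]
--
-- def mark(answers, student_answer) -> int: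
--     result = 0
--     length_of_student_answer = len(student_answer)
--
--     for i in range(len(answers)):
--         if answers[i] == student_answer[i % length_of_student_answer]:
--             result += 1
--
--     return result
-- ===== SOURCE B (Python) =====
-- def solution(answers):
--     p1 = [1, 2, 3, 4, 5]
--     p2 = [2, 1, 2, 3, 2, 4, 2, 5]
--     p3 = [3, 3, 1, 1, 2, 2, 4, 4, 5, 5]
--     c1 = c2 = c3 = 0
--     for i, a in enumerate(answers):
--         if a == p1[i % 5]:
--             c1 += 1
--         if a == p2[i % 8]:
--             c2 += 1
--         if a == p3[i % 10]:
--             c3 += 1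
--     best = max(c1, max(c2, c3))
--     res = []
--     if c1 == best:
--         res.append(1)
--     if c2 == best:
--         res.append(2)
--     if c3 == best:
--         res.append(3)
--     return res
-- ===== Notes on version B (the rewrite author's own statement) =====
-- stated objective: simpler
-- what changed: Drops the mark helper, the score_list and the range(3) comprehension: one fused pass over enumerate(answers) maintains three counters at once, then the result is assembled by three direct comparisons against max(c1,c2,c3).
import Mathlib
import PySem

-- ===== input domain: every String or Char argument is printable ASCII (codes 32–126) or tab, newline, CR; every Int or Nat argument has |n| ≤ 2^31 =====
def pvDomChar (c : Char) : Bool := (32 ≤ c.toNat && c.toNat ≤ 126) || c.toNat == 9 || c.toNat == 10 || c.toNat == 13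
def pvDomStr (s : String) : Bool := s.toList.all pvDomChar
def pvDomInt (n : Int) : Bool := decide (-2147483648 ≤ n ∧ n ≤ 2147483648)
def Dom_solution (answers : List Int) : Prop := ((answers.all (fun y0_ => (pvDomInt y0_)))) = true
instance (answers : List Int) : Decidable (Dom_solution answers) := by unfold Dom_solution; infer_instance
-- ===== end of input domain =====

-- B fuses A's three mark-scans into one pass over enumerate(answers) with three counters (objective: simpler).


-- ===== PORT A =====
-- mark(answers, student_answer): indices drawn from range(len(answers)) are always in range,
-- so Python's answers[i] / student_answer[i % L] never raise; pyGetD with default 0 is exact here.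
def pvMark (answers student_answer : List Int) : Int :=
  (PySem.List.pyRange 0 (answers.length : Int) 1).foldl
    (fun result i =>
      if PySem.List.pyGetD answers i 0
           = PySem.List.pyGetD student_answer (PySem.Int.mod i (student_answer.length : Int)) 0
      then result + 1 else result) 0

def solution (answers : List Int) : List Int :=
  let first_student : List Int := [1, 2, 3, 4, 5]
  let second_student : List Int := [2, 1, 2, 3, 2, 4, 2, 5]
  let third_student : List Int := [3, 3, 1, 1, 2, 2, 4, 4, 5, 5]
  let score_list : List Int :=
    [first_student, second_student, third_student].foldl
      (fun acc student => acc ++ [pvMark answers student]) []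
  -- max(score_list): the list has three elements, so Python's max never raises; getD 0 is a totalization guard only
  let highest_score : Int := (PySem.List.max? score_list (fun x => x)).getD 0
  (PySem.List.pyRange 0 3 1).foldl
    (fun acc idx => if PySem.List.pyGetD score_list idx 0 = highest_score then acc ++ [idx + 1] else acc) []

-- ===== PORT B =====
def solution_alt (answers : List Int) : List Int :=
  let p1 : List Int := [1, 2, 3, 4, 5]
  let p2 : List Int := [2, 1, 2, 3, 2, 4, 2, 5]
  let p3 : List Int := [3, 3, 1, 1, 2, 2, 4, 4, 5, 5]
  let c : Int × Int × Int :=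
    (PySem.List.enumerate answers 0).foldl
      (fun c ia =>
        ((if ia.2 = PySem.List.pyGetD p1 (PySem.Int.mod ia.1 5) 0 then c.1 + 1 else c.1),
         (if ia.2 = PySem.List.pyGetD p2 (PySem.Int.mod ia.1 8) 0 then c.2.1 + 1 else c.2.1),
         (if ia.2 = PySem.List.pyGetD p3 (PySem.Int.mod ia.1 10) 0 then c.2.2 + 1 else c.2.2)))
      (0, 0, 0)
  let best : Int := max c.1 (max c.2.1 c.2.2)
  ((if c.1 = best then [1] else []) ++ (if c.2.1 = best then [2] else []) ++
    (if c.2.2 = best then [3] else []))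

-- ===== PRECONDITION & SPEC =====
def Spec_solution (answers : List Int) (out : List Int) : Prop := out = solution_alt answers
instance (answers : List Int) (out : List Int) : Decidable (Spec_solution answers out) := by unfold Spec_solution; infer_instance

-- ===== CLAIM (what is proved, stated in full; the proofs are below) =====
def Claim_equal_solution : Prop := ∀ (answers : List Int), Dom_solution answers → Spec_solution answers (solution answers)

-- ===== LEMMAS AND PROOFS =====

-- B's one fused counter (for one pattern) is exactly A's mark of that pattern.
theorem pvCounter_eq_mark (answers p : List Int) :
    (PySem.List.enumerate answers 0).foldl
      (fun (c : Int) ia =>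
        if ia.2 = PySem.List.pyGetD p (PySem.Int.mod ia.1 (p.length : Int)) 0 then c + 1 else c) 0
    = pvMark answers p := by
  rw [PySem.List.enumerate_eq_map_pyRange (d := 0), List.foldl_map]
  simp [pvMark]

theorem pvC1 (answers : List Int) :
    (PySem.List.enumerate answers 0).foldl
      (fun (c : Int) (ia : Int × Int) =>
        if ia.2 = PySem.List.pyGetD [1, 2, 3, 4, 5] (PySem.Int.mod ia.1 5) 0 then c + 1 else c) 0
    = pvMark answers [1, 2, 3, 4, 5] := by
  simpa using pvCounter_eq_mark answers [1, 2, 3, 4, 5]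

theorem pvC2 (answers : List Int) :
    (PySem.List.enumerate answers 0).foldl
      (fun (c : Int) (ia : Int × Int) =>
        if ia.2 = PySem.List.pyGetD [2, 1, 2, 3, 2, 4, 2, 5] (PySem.Int.mod ia.1 8) 0 then c + 1 else c) 0
    = pvMark answers [2, 1, 2, 3, 2, 4, 2, 5] := by
  simpa using pvCounter_eq_mark answers [2, 1, 2, 3, 2, 4, 2, 5]

theorem pvC3 (answers : List Int) :
    (PySem.List.enumerate answers 0).foldl
      (fun (c : Int) (ia : Int × Int) =>
        if ia.2 = PySem.List.pyGetD [3, 3, 1, 1, 2, 2, 4, 4, 5, 5] (PySem.Int.mod ia.1 10) 0 then c + 1 else c) 0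
    = pvMark answers [3, 3, 1, 1, 2, 2, 4, 4, 5, 5] := by
  simpa using pvCounter_eq_mark answers [3, 3, 1, 1, 2, 2, 4, 4, 5, 5]

-- ===== VERDICT (by name: the statement is the Claim_ definition above) =====
theorem solution_spec : Claim_equal_solution := by
  intro answers _
  simp only [Spec_solution, solution, solution_alt]
  rw [PySem.List.foldl_prod_mk
        (f := fun (c : Int) (ia : Int × Int) =>
          if ia.2 = PySem.List.pyGetD [1, 2, 3, 4, 5] (PySem.Int.mod ia.1 5) 0 then c + 1 else c)
        (g := fun (c : Int × Int) (ia : Int × Int) =>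
          ((if ia.2 = PySem.List.pyGetD [2, 1, 2, 3, 2, 4, 2, 5] (PySem.Int.mod ia.1 8) 0 then c.1 + 1 else c.1),
           (if ia.2 = PySem.List.pyGetD [3, 3, 1, 1, 2, 2, 4, 4, 5, 5] (PySem.Int.mod ia.1 10) 0 then c.2 + 1 else c.2))),
      PySem.List.foldl_prod_mk
        (f := fun (c : Int) (ia : Int × Int) =>
          if ia.2 = PySem.List.pyGetD [2, 1, 2, 3, 2, 4, 2, 5] (PySem.Int.mod ia.1 8) 0 then c + 1 else c)
        (g := fun (c : Int) (ia : Int × Int) =>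
          if ia.2 = PySem.List.pyGetD [3, 3, 1, 1, 2, 2, 4, 4, 5, 5] (PySem.Int.mod ia.1 10) 0 then c + 1 else c)]
  rw [pvC1, pvC2, pvC3]
  have hr : PySem.List.pyRange 0 3 1 = [0, 1, 2] := by decide
  simp only [hr, List.foldl, List.nil_append, List.cons_append,
    List.append_assoc]
  generalize pvMark answers [1, 2, 3, 4, 5] = m1
  generalize pvMark answers [2, 1, 2, 3, 2, 4, 2, 5] = m2
  generalize pvMark answers [3, 3, 1, 1, 2, 2, 4, 4, 5, 5] = m3
  rw [PySem.List.max?_id_cons]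
  simp [PySem.List.pyGetD, PySem.List.pyGet?, PySem.List.pyIdx?, max_assoc, List.foldl]
  split_ifs <;> rfl
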